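-- pv_equiv track=rewrite | github.com/ppinko/python_exercises | string/hard_almost_anagram.py | almost_palindrome
-- ===== SOURCE A (Python) =====
-- def almost_palindrome(txt: str) -> bool:
--     counter = 0
--     while len(txt) > 1:
--         if txt[0] != txt[-1]:
--             counter += 1
--         txt = txt[1:-1]
--     if counter > 1 or counter == 0:
--         return False
--     return True
-- ===== SOURCE B (Python) =====
-- def almost_palindrome(txt: str) -> bool:
--     m = len(txt) // 2
--     mismatches = sum(a != b for a, b in zip(txt[:m], reversed(txt)))
--     return mismatches == 1
-- ===== Notes on version B (the rewrite author's own statement) =====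
-- stated objective: faster
-- what changed: Replaces A's strip-both-ends-and-reslice while-loop (each iteration copies the string) by a single pass counting mismatches between the first half and the reversed string.
import Mathlib
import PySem

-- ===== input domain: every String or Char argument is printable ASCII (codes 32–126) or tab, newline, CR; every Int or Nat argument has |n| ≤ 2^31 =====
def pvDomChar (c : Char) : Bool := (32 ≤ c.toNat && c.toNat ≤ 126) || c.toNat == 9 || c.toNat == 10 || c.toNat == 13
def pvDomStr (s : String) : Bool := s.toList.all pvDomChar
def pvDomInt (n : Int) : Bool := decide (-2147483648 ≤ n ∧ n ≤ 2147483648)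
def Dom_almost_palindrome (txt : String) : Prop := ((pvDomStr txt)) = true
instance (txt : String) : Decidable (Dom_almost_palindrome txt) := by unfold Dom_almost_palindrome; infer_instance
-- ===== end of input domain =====

-- B replaces A's quadratic strip-the-ends-and-reslice loop by one linear pass
-- comparing the first half with the reversed string (objective: faster).

-- ===== PORT A =====
-- while len(txt) > 1: compare ends, txt = txt[1:-1]
def pvLoopA (l : List Char) (counter : Int) : Int :=
  if l.length > 1 then
    pvLoopA (PySem.List.slice l (some 1) (some (-1)))
      (if PySem.List.pyGet? l 0 ≠ PySem.List.pyGet? l (-1) then counter + 1 else counter)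
  else counter
termination_by l.length
decreasing_by
  simp only [PySem.List.length_slice, PySem.List.clampIdx_neg_one]
  have : PySem.List.clampIdx l.length 1 = min 1 l.length := PySem.List.clampIdx_natCast l.length 1
  omega

def almost_palindrome (txt : String) : Bool :=
  let counter := pvLoopA txt.toList 0
  if counter > 1 ∨ counter = 0 then false else true

-- ===== PORT B =====
-- m = len(txt)//2; mismatches = sum(a != b for a, b in zip(txt[:m], reversed(txt))); return mismatches == 1
def almost_palindrome_alt (txt : String) : Bool :=
  let l := txt.toList
  let m := l.length / 2
  let mismatches := ((l.take m).zip l.reverse).countP (fun p => p.1 != p.2)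
  mismatches == 1

-- ===== PRECONDITION & SPEC =====
def Spec_almost_palindrome (txt : String) (out : Bool) : Prop := out = almost_palindrome_alt txt
instance (txt : String) (out : Bool) : Decidable (Spec_almost_palindrome txt out) := by unfold Spec_almost_palindrome; infer_instance

-- ===== CLAIM (what is proved, stated in full; the proofs are below) =====
def Claim_equal_almost_palindrome : Prop := ∀ (txt : String), Dom_almost_palindrome txt → Spec_almost_palindrome txt (almost_palindrome txt)

-- ===== LEMMAS AND PROOFS =====

-- zip truncates at the shorter list, so a long-enough right tail is irrelevant
lemma pv_zip_append_right {α β : Type} (xs : List α) (ys zs : List β)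
    (h : xs.length ≤ ys.length) : xs.zip (ys ++ zs) = xs.zip ys := by
  induction xs generalizing ys with
  | nil => simp
  | cons a xs ih =>
    cases ys with
    | nil => simp at h
    | cons b ys => simp_all [List.zip_cons_cons]

-- txt[1:-1] on a two-ended list strips exactly the two ends
lemma pv_slice_mid (a b : Char) (mid : List Char) :
    PySem.List.slice (a :: (mid ++ [b])) (some 1) (some (-1)) = mid := by
  simp only [PySem.List.slice, PySem.List.clampIdx, Int.reduceNeg, Int.neg_neg_iff_pos,
    zero_lt_one, ↓reduceIte, List.length_cons, List.length_append, List.length_nil, zero_add,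
    Nat.cast_add, Nat.cast_one, add_neg_cancel_right, Int.toNat_natCast_add_one, Int.reduceLT,
    Int.toNat_one, le_add_iff_nonneg_left, zero_le, inf_of_le_left, List.drop_succ_cons,
    List.drop_zero]
  rw [if_neg (by omega)]
  simp

-- the mismatch count B computes, as a function of the list
def pvMism (l : List Char) : Nat :=
  ((l.take (l.length / 2)).zip l.reverse).countP (fun p => p.1 != p.2)

lemma pvMism_short (l : List Char) (h : l.length ≤ 1) : pvMism l = 0 := by
  cases l with
  | nil => rfl
  | cons a t =>
    cases t with
    | nil => simp [pvMism]
    | cons b u => simp at h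

lemma pvMism_cons_concat (a b : Char) (mid : List Char) :
    pvMism (a :: (mid ++ [b])) = (if a != b then 1 else 0) + pvMism mid := by
  unfold pvMism
  have hlen : (a :: (mid ++ [b])).length = mid.length + 2 := by simp
  have hm : (a :: (mid ++ [b])).length / 2 = mid.length / 2 + 1 := by omega
  have htk : (mid ++ [b]).take (mid.length / 2) = mid.take (mid.length / 2) := by
    rw [List.take_append_of_le_length (by omega)]
  have hrev : (a :: (mid ++ [b])).reverse = b :: (mid.reverse ++ [a]) := by simp
  rw [hm, hrev, List.take_succ_cons, htk, List.zip_cons_cons,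
    pv_zip_append_right _ _ _ (by simp [List.length_take]),
    List.countP_cons]
  rcases Bool.eq_false_or_eq_true (a != b) with h | h
  · simp only [h, if_true]
    omega
  · simp [h]

-- A's loop adds the mismatch count to its accumulator
lemma pvLoopA_eq (l : List Char) (c : Int) : pvLoopA l c = c + (pvMism l : Int) := by
  induction l, c using pvLoopA.induct with
  | case1 l c hlen ih =>
    have h2 : 2 ≤ l.length := by omega
    obtain ⟨a, t, rfl⟩ : ∃ a t, l = a :: t := by
      cases l with
      | nil => simp at hlen
      | cons a t => exact ⟨a, t, rfl⟩
    obtain ⟨mid, b, rfl⟩ : ∃ mid b, t = mid ++ [b] := by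
      rcases List.eq_nil_or_concat t with rfl | ⟨mid, b, rfl⟩
      · simp at h2
      · exact ⟨mid, b, by simp⟩
    rw [pvLoopA]
    simp only [hlen, if_pos]
    simp only [dite_eq_ite] at ih
    rw [pv_slice_mid] at ih ⊢
    have hg0 : PySem.List.pyGet? (a :: (mid ++ [b])) 0 = some a := by
      simp [PySem.List.pyGet?, PySem.List.pyIdx?, show (0:Int) ≤ (mid.length:Int) + 1 by omega]
    have hg1 : PySem.List.pyGet? (a :: (mid ++ [b])) (-1) = some b := by
      simp [PySem.List.pyGet?, PySem.List.pyIdx?]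
    rw [ih, pvMism_cons_concat, hg0, hg1]
    by_cases hab : a = b
    · simp [hab]
    · simp [hab]
      ring
  | case2 l c hlen =>
    rw [pvLoopA]
    simp only [hlen, if_false, pvMism_short l (by omega)]
    simp

-- ===== VERDICT (by name: the statement is the Claim_ definition above) =====
theorem almost_palindrome_spec : Claim_equal_almost_palindrome := by
  intro txt _
  unfold Spec_almost_palindrome almost_palindrome almost_palindrome_alt
  rw [pvLoopA_eq]
  have : ((txt.toList.take (txt.toList.length / 2)).zip txt.toList.reverse).countP
      (fun p => p.1 != p.2) = pvMism txt.toList := rfl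
  simp only [this]
  rcases h : pvMism txt.toList with _ | _ | k <;> simp
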